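-- pv_equiv track=rewrite | github.com/NhanDoV/Lectures_notes-teaching-in-VN- | basic_python/practices/Bit-Manipulation/Multiply/multiply.py | using_bit_manipulation_v1
-- ===== SOURCE A (Python) =====
-- def using_bit_manipulation_v1(num1: int, num2: int) -> int:
--     """
--         Find the product of 2 integer without using multiply directly
--         Here we use + operators and LEFT - RIGHT shift ONLY
--     """
--     # You can also use math.log2(num2) here instead
--     max_floor_deg = 0
--     temp_num = num2
--     while temp_num > 1:
--         temp_num = temp_num >> 1
--         max_floor_deg += 1
--
--     # Ordered the number descendingly
--     degs = [ (max_floor_deg - d) for d in range(max_floor_deg)] + [0]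
--
--     # Iterate in degree to find the signs of each corresponding value
--     prod = 0
--     for deg in degs:
--         diff = num2 - (1 << deg)            # diff  =   num     -     pow(2, deg)
--         if diff >= 0:
--             num2 = diff
--             sign = 1
--         else:
--             num2 = num2
--             sign = 0
--         prod += sign * (num1 << deg)
--
--     return prod
-- ===== SOURCE B (Python) =====
-- def using_bit_manipulation_v1(num1: int, num2: int) -> int:
--     """LSB-first shift-and-add (Russian peasant) multiplication.
--     Matches A exactly: for num2 <= 0 the loop never runs and 0 is returned."""
--     result = 0
--     while num2 > 0:
--         if num2 % 2 == 1:
--             result += num1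
--         num1 += num1      # num1 <<= 1
--         num2 //= 2        # num2 >>= 1
--     return result
-- ===== Notes on version B (the rewrite author's own statement) =====
-- stated objective: simpler
-- what changed: Replaces A's MSB-first scheme (a warm-up loop computing the floor log2, an explicit descending degree list, and greedy subtraction of powers of two) with the canonical LSB-first shift-and-add (peasant) loop: one while-loop testing the low bit, doubling num1 and halving num2.
import Mathlib
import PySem

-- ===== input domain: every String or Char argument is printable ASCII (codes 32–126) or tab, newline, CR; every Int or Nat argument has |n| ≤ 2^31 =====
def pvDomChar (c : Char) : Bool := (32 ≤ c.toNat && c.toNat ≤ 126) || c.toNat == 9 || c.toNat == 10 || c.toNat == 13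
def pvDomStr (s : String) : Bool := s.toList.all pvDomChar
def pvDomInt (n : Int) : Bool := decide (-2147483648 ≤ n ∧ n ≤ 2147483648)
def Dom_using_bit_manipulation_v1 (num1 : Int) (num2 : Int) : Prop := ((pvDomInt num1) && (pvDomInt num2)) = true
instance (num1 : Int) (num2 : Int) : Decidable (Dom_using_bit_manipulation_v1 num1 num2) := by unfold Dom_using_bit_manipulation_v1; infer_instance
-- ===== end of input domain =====

-- B replaces A's MSB-first greedy bit extraction (log-loop + descending degree list +
-- repeated subtraction) by the classic LSB-first shift-and-add loop; objective: simpler.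


-- ===== PORT A =====
-- `while temp_num > 1: temp_num >>= 1; max_floor_deg += 1`
def pvDegLoop (temp : Int) (acc : Int) : Int :=
  if 1 < temp then pvDegLoop (temp >>> (1 : Nat)) (acc + 1) else acc
termination_by temp.toNat
decreasing_by
  rw [Int.shiftRight_eq_div_pow]; omega

-- one iteration of A's `for deg in degs` loop over the state (num2, prod).
-- Python `x << deg` is ported as `x <<< deg.toNat`: exact since every deg in degs is ≥ 0.
def pvStepA (num1 : Int) (s : Int × Int) (deg : Int) : Int × Int :=
  let diff := s.1 - ((1 : Int) <<< deg.toNat)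
  if 0 ≤ diff then (diff, s.2 + 1 * (num1 <<< deg.toNat))
  else (s.1, s.2 + 0 * (num1 <<< deg.toNat))

def using_bit_manipulation_v1 (num1 : Int) (num2 : Int) : Int :=
  (((PySem.List.pyRange 0 (pvDegLoop num2 0) 1).map (fun d => pvDegLoop num2 0 - d)
      ++ [0]).foldl (pvStepA num1) (num2, 0)).2

-- ===== PORT B =====
-- `while num2 > 0: if num2 % 2 == 1: result += num1; num1 += num1; num2 //= 2`
def pvAltLoop (num1 : Int) (num2 : Int) (result : Int) : Int :=
  if 0 < num2 then
    pvAltLoop (num1 + num1) (PySem.Int.floordiv num2 2)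
      (if PySem.Int.mod num2 2 = 1 then result + num1 else result)
  else result
termination_by num2.toNat
decreasing_by
  rw [PySem.Int.floordiv_eq_ediv_of_pos (by omega)]; omega

def using_bit_manipulation_v1_alt (num1 : Int) (num2 : Int) : Int :=
  pvAltLoop num1 num2 0

-- ===== PRECONDITION & SPEC =====
def Spec_using_bit_manipulation_v1 (num1 : Int) (num2 : Int) (out : Int) : Prop := out = using_bit_manipulation_v1_alt num1 num2
instance (num1 : Int) (num2 : Int) (out : Int) : Decidable (Spec_using_bit_manipulation_v1 num1 num2 out) := by unfold Spec_using_bit_manipulation_v1; infer_instance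

-- ===== CLAIM (what is proved, stated in full; the proofs are below) =====
def Claim_equal_using_bit_manipulation_v1 : Prop := ∀ (num1 : Int) (num2 : Int), Dom_using_bit_manipulation_v1 num1 num2 → Spec_using_bit_manipulation_v1 num1 num2 (using_bit_manipulation_v1 num1 num2)

-- ===== LEMMAS AND PROOFS =====

-- descending degree list [k, k-1, ..., 1, 0] as integers
def descL : Nat → List Int
  | 0 => [0]
  | k + 1 => ((k + 1 : Nat) : Int) :: descL k

theorem shiftR_one (t : Int) : t >>> (1 : Nat) = t / 2 := by
  rw [Int.shiftRight_eq_div_pow]; norm_num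

theorem pvDegLoop_acc : ∀ (n : Nat) (t : Int), t.toNat = n →
    ∀ acc, pvDegLoop t acc = pvDegLoop t 0 + acc := by
  intro n
  induction n using Nat.strong_induction_on with
  | _ n ih =>
    intro t hn acc
    by_cases h : 1 < t
    · rw [pvDegLoop, if_pos h]
      conv_rhs => rw [pvDegLoop, if_pos h]
      rw [ih (t >>> (1:Nat)).toNat (by rw [shiftR_one]; omega) _ rfl (acc + 1),
        ih (t >>> (1:Nat)).toNat (by rw [shiftR_one]; omega) _ rfl (0 + 1)]
      ring
    · rw [pvDegLoop, if_neg h, pvDegLoop, if_neg h]; ring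

theorem pvDegLoop_nonneg : ∀ (n : Nat) (t : Int), t.toNat = n → 0 ≤ pvDegLoop t 0 := by
  intro n
  induction n using Nat.strong_induction_on with
  | _ n ih =>
    intro t hn
    by_cases h : 1 < t
    · rw [pvDegLoop, if_pos h,
        pvDegLoop_acc (t >>> (1:Nat)).toNat _ rfl]
      have := ih (t >>> (1:Nat)).toNat (by rw [shiftR_one]; omega) _ rfl
      omega
    · rw [pvDegLoop, if_neg h]

theorem pvDegLoop_bound : ∀ (n : Nat) (t : Int), t.toNat = n → 0 < t →
    t < 2 ^ ((pvDegLoop t 0).toNat + 1) := by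
  intro n
  induction n using Nat.strong_induction_on with
  | _ n ih =>
    intro t hn ht
    by_cases h : 1 < t
    · rw [pvDegLoop, if_pos h, pvDegLoop_acc (t >>> (1:Nat)).toNat _ rfl]
      have hlt : (t >>> (1:Nat)).toNat < n := by rw [shiftR_one]; omega
      have hb := ih _ hlt (t >>> (1:Nat)) rfl (by rw [shiftR_one]; omega)
      have hnn := pvDegLoop_nonneg (t >>> (1:Nat)).toNat (t >>> (1:Nat)) rfl
      have he : (pvDegLoop (t >>> (1:Nat)) 0 + (0 + 1)).toNat
          = (pvDegLoop (t >>> (1:Nat)) 0).toNat + 1 := by omega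
      rw [he, pow_succ]
      simp only [shiftR_one] at hb hnn he ⊢
      omega
    · rw [pvDegLoop, if_neg h]
      norm_num
      omega

theorem degs_eq_descL (k : Nat) :
    (List.range k).map (fun i : Nat => ((k : Int) - (i : Int))) ++ [0] = descL k := by
  induction k with
  | zero => simp [descL]
  | succ k ih =>
      rw [List.range_succ_eq_map, List.map_cons, List.map_map]
      have : ((fun i : Nat => (((k + 1 : Nat) : Int) - (i : Int))) ∘ Nat.succ)
          = (fun i : Nat => ((k : Int) - (i : Int))) := by
        funext i
        simp only [Function.comp_apply, Nat.succ_eq_add_one]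
        push_cast; ring
      rw [this]
      simpa [descL] using ih

theorem foldA_descL (n1 : Int) (k : Nat) : ∀ n2 prod : Int, 0 ≤ n2 → n2 < 2 ^ (k + 1) →
    (List.foldl (pvStepA n1) (n2, prod) (descL k)).2 = prod + n1 * n2 := by
  induction k with
  | zero =>
      intro n2 prod h0 h1
      have : n2 = 0 ∨ n2 = 1 := by omega
      rcases this with h | h <;> subst h <;>
        simp [descL, pvStepA, Int.shiftLeft_eq]
  | succ k ih =>
      intro n2 prod h0 h1
      rw [descL, List.foldl_cons, pvStepA]
      have htn : ((k + 1 : Nat) : Int).toNat = k + 1 := by omega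
      have hsh : (1 : Int) <<< ((k + 1 : Nat) : Int).toNat = 2 ^ (k + 1) := by
        rw [htn, Int.shiftLeft_eq]; ring
      have hsh1 : n1 <<< ((k + 1 : Nat) : Int).toNat = n1 * 2 ^ (k + 1) := by
        rw [htn, Int.shiftLeft_eq]
      by_cases hd : 0 ≤ n2 - (1 : Int) <<< ((k + 1 : Nat) : Int).toNat
      · rw [if_pos hd]
        rw [hsh] at hd
        rw [ih _ _ (by omega) (by rw [pow_succ] at h1; omega)]
        rw [hsh, hsh1]; ring
      · rw [if_neg hd]
        rw [hsh] at hd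
        rw [ih _ _ h0 (by omega)]
        rw [hsh1]; ring

theorem portA_eq (num1 num2 : Int) :
    using_bit_manipulation_v1 num1 num2 = if 0 < num2 then num1 * num2 else 0 := by
  by_cases h : 0 < num2
  · rw [if_pos h]
    have hm := pvDegLoop_nonneg num2.toNat num2 rfl
    have hb := pvDegLoop_bound num2.toNat num2 rfl h
    unfold using_bit_manipulation_v1
    rw [PySem.List.pyRange_one, List.map_map]
    have hz : (pvDegLoop num2 0 - 0).toNat = (pvDegLoop num2 0).toNat := by omega
    rw [hz]
    have hcomp : ((fun d : Int => pvDegLoop num2 0 - d) ∘ (fun k : Nat => 0 + (k : Int)))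
        = (fun i : Nat => (((pvDegLoop num2 0).toNat : Int) - (i : Int))) := by
      funext i; simp; omega
    rw [hcomp, degs_eq_descL]
    rw [foldA_descL num1 _ num2 0 (by omega) hb]
    ring
  · rw [if_neg h]
    unfold using_bit_manipulation_v1
    have hm : pvDegLoop num2 0 = 0 := by rw [pvDegLoop, if_neg (by omega)]
    rw [hm]
    have hneg : ¬ (1 ≤ num2) := by omega
    simp [pvStepA, hneg]

theorem portB_eq_of_nonneg (n : Nat) : ∀ n2 : Int, n2.toNat = n → 0 ≤ n2 →
    ∀ n1 res : Int, pvAltLoop n1 n2 res = res + n1 * n2 := by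
  induction n using Nat.strong_induction_on with
  | _ n ih =>
      intro n2 hn h0 n1 res
      by_cases h : 0 < n2
      · rw [pvAltLoop, if_pos h]
        have hq : PySem.Int.floordiv n2 2 = n2 / 2 :=
          PySem.Int.floordiv_eq_ediv_of_pos (by omega)
        have hr : PySem.Int.mod n2 2 = n2 % 2 :=
          PySem.Int.mod_eq_emod_of_pos (by omega)
        rw [ih (n2 / 2).toNat (by omega) _ (by rw [hq]) (by rw [hq]; omega)]
        rw [hq, hr]
        obtain ⟨q, hq2⟩ : ∃ q, n2 / 2 = q := ⟨_, rfl⟩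
        rw [hq2]
        by_cases hb : n2 % 2 = 1
        · rw [if_pos hb]
          have h2 : n2 = 2 * q + 1 := by omega
          rw [h2]; ring
        · rw [if_neg hb]
          have h2 : n2 = 2 * q := by omega
          rw [h2]; ring
      · rw [pvAltLoop, if_neg h]
        have h2 : n2 = 0 := by omega
        rw [h2]; ring

theorem portB_eq (num1 num2 : Int) :
    using_bit_manipulation_v1_alt num1 num2 = if 0 < num2 then num1 * num2 else 0 := by
  by_cases h : 0 < num2
  · rw [if_pos h]
    unfold using_bit_manipulation_v1_alt
    rw [portB_eq_of_nonneg num2.toNat num2 rfl (by omega)]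
    ring
  · rw [if_neg h]
    unfold using_bit_manipulation_v1_alt
    rw [pvAltLoop, if_neg h]

-- ===== VERDICT (by name: the statement is the Claim_ definition above) =====
theorem using_bit_manipulation_v1_spec : Claim_equal_using_bit_manipulation_v1 := by
  intro num1 num2 _
  unfold Spec_using_bit_manipulation_v1
  rw [portA_eq, portB_eq]
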